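-- pv_equiv track=rewrite | github.com/AESMatias/t2-code | entrega_final/cliente/backend/funciones_cliente.py | validate_enemy_colision
-- ===== SOURCE A (Python) =====
-- def validate_enemy_colision(laberinto: list[list], direction: str) -> bool:
--     enemy_positions = []
--     row_counter, col_counter = 0, 0
--     for row in laberinto:
--         for col in row:
--             if col.startswith('carrot'):
--                 enemy_positions.append((row_counter, col_counter))
--             elif 'wolf' in col:
--                 enemy_positions.append((row_counter, col_counter))
--             elif col == 'C':
--                 rabbit_position = (row_counter, col_counter)
--             col_counter += 1
--         col_counter = 0
--         row_counter += 1
--     row_counter = 0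
--
--     for enemy in enemy_positions:
--         if enemy[1] == rabbit_position[1] and enemy[0] == rabbit_position[0] + 1\
--                 or enemy[1] == rabbit_position[1] and enemy[0] == rabbit_position[0]-1:
--             return True, rabbit_position
--         elif enemy[0] == rabbit_position[0] and rabbit_position[1] == enemy[1] + 1\
--                 or enemy[0] == rabbit_position[0] and rabbit_position[1] == enemy[1] - 1:
--             return True, rabbit_position
--     return False, rabbit_position
-- ===== SOURCE B (Python) =====
-- def _is_enemy(cell):
--     return cell.startswith('carrot') or 'wolf' in cell
--
--
-- def _enemy_at(laberinto, r, c):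
--     if 0 <= r < len(laberinto) and 0 <= c < len(laberinto[r]):
--         return _is_enemy(laberinto[r][c])
--     return False
--
--
-- def validate_enemy_colision(laberinto: list[list], direction: str) -> bool:
--     for r, row in enumerate(laberinto):
--         for c, cell in enumerate(row):
--             if cell == 'C':
--                 rabbit_position = (r, c)
--     r, c = rabbit_position
--     hit = (_enemy_at(laberinto, r - 1, c) or _enemy_at(laberinto, r + 1, c)
--            or _enemy_at(laberinto, r, c - 1) or _enemy_at(laberinto, r, c + 1))
--     return hit, rabbit_position
-- ===== Notes on version B (the rewrite author's own statement) =====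
-- stated objective: simpler
-- what changed: Instead of collecting every enemy position during the grid scan and then scanning that list for an adjacent one, B records only the rabbit's (last 'C') coordinates and directly inspects the four orthogonal neighbour cells with bounds checks.
import Mathlib
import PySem

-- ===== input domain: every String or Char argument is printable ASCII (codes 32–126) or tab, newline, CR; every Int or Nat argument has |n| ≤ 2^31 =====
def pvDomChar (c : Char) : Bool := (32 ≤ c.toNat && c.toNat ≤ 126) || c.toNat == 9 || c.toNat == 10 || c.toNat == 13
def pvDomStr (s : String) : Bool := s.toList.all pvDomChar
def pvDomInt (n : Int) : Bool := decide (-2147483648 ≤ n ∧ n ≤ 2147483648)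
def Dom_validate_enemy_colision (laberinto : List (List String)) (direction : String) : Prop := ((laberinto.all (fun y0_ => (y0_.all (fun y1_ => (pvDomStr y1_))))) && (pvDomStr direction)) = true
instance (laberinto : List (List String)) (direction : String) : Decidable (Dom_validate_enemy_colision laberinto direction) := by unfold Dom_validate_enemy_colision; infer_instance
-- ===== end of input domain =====

-- B records only the rabbit position during the scan and then checks the four orthogonal
-- neighbour cells directly, instead of A's collected-enemy-list pass (objective: simpler).

-- ===== PORT A =====
-- inner loop body of A's grid scan: state = (enemy_positions, rabbit_position?, col_counter)
def pvInnerA (rI : Int) (st : List (Int × Int) × Option (Int × Int) × Int) (col : String) :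
    List (Int × Int) × Option (Int × Int) × Int :=
  match st with
  | (es, rab, c) =>
    if PySem.Str.startswith col "carrot" then (es ++ [(rI, c)], rab, c + 1)
    else if PySem.Str.isIn "wolf" col then (es ++ [(rI, c)], rab, c + 1)
    else if col == "C" then (es, some (rI, c), c + 1)
    else (es, rab, c + 1)

-- A's full grid scan (row_counter threaded, col_counter reset per row)
def pvScanA (laberinto : List (List String)) : List (Int × Int) × Option (Int × Int) :=
  match laberinto.foldl
      (fun (st : List (Int × Int) × Option (Int × Int) × Int) row =>
        match st with
        | (es, rab, r) =>
          match row.foldl (pvInnerA r) (es, rab, 0) with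
          | (es', rab', _) => (es', rab', r + 1))
      ([], none, 0) with
  | (es, rab, _) => (es, rab)

-- A's second loop over the collected enemy positions
def pvLoopA (rp : Int × Int) : List (Int × Int) → Bool
  | [] => false
  | e :: rest =>
    if (e.2 == rp.2 && e.1 == rp.1 + 1) || (e.2 == rp.2 && e.1 == rp.1 - 1) then true
    else if (e.1 == rp.1 && rp.2 == e.2 + 1) || (e.1 == rp.1 && rp.2 == e.2 - 1) then true
    else pvLoopA rp rest

def validate_enemy_colision (laberinto : List (List String)) (direction : String) :
    Bool × (Int × Int) :=
  match pvScanA laberinto with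
  | (es, some rp) => (pvLoopA rp es, rp)
  | (_, none) => (false, (-1, -1))   -- Python raises NameError here; excluded by Pre_

-- ===== PORT B =====
def pvIsEnemyB (cell : String) : Bool :=
  PySem.Str.startswith cell "carrot" || PySem.Str.isIn "wolf" cell

-- Source B's _enemy_at: bounds-checked neighbour inspection
def pvEnemyAt (laberinto : List (List String)) (r c : Int) : Bool :=
  if 0 ≤ r ∧ r < (laberinto.length : Int) then
    if 0 ≤ c ∧ c < ((laberinto.getD r.toNat []).length : Int) then
      pvIsEnemyB ((laberinto.getD r.toNat []).getD c.toNat "")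
    else false
  else false

-- Source B's enumerate scan keeping the last 'C'
def pvFindRabbitB (laberinto : List (List String)) : Option (Int × Int) :=
  (PySem.List.enumerate laberinto).foldl
    (fun rab rrow =>
      (PySem.List.enumerate rrow.2).foldl
        (fun rab2 ccell => if ccell.2 == "C" then some (rrow.1, ccell.1) else rab2) rab)
    none

def validate_enemy_colision_alt (laberinto : List (List String)) (direction : String) :
    Bool × (Int × Int) :=
  match pvFindRabbitB laberinto with
  | some (r, c) =>
    (pvEnemyAt laberinto (r - 1) c || pvEnemyAt laberinto (r + 1) c ||
       pvEnemyAt laberinto r (c - 1) || pvEnemyAt laberinto r (c + 1), (r, c))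
  | none => (false, (-1, -1))   -- Python raises NameError here; excluded by Pre_

-- ===== PRECONDITION & SPEC =====
-- Pre_ excludes grids without a 'C' cell: there Python A (and B) raise NameError.
def Pre_validate_enemy_colision (laberinto : List (List String)) (direction : String) : Prop :=
  ∃ row ∈ laberinto, "C" ∈ row
instance (laberinto : List (List String)) (direction : String) :
    Decidable (Pre_validate_enemy_colision laberinto direction) := by
  unfold Pre_validate_enemy_colision; infer_instance

def pvWitness_validate_enemy_colision : List (List String) × String :=
  ([["x", "C"], ["wolf"]], "up")

def Spec_validate_enemy_colision (laberinto : List (List String)) (direction : String) (out : Bool × (Int × Int)) : Prop := out = validate_enemy_colision_alt laberinto direction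
instance (laberinto : List (List String)) (direction : String) (out : Bool × (Int × Int)) : Decidable (Spec_validate_enemy_colision laberinto direction out) := by unfold Spec_validate_enemy_colision; infer_instance

-- ===== CLAIM (what is proved, stated in full; the proofs are below) =====
def Claim_equal_validate_enemy_colision : Prop := ∀ (laberinto : List (List String)) (direction : String), Dom_validate_enemy_colision laberinto direction → Pre_validate_enemy_colision laberinto direction → Spec_validate_enemy_colision laberinto direction (validate_enemy_colision laberinto direction)

-- ===== LEMMAS AND PROOFS =====

-- reference shapes of the scan (proof-only)
def rowEnem (rI c0 : Int) : List String → List (Int × Int)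
  | [] => []
  | cell :: rest => (if pvIsEnemyB cell then [(rI, c0)] else []) ++ rowEnem rI (c0 + 1) rest

def rowRab (rI c0 : Int) : List String → Option (Int × Int) → Option (Int × Int)
  | [], rab => rab
  | cell :: rest, rab => rowRab rI (c0 + 1) rest (if cell == "C" then some (rI, c0) else rab)

def gridEnem (r0 : Int) : List (List String) → List (Int × Int)
  | [] => []
  | row :: rest => rowEnem r0 0 row ++ gridEnem (r0 + 1) rest

def gridRab (r0 : Int) : List (List String) → Option (Int × Int) → Option (Int × Int)
  | [], rab => rab
  | row :: rest, rab => gridRab (r0 + 1) rest (rowRab r0 0 row rab)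

lemma rowA_eq (rI : Int) (row : List String) :
    ∀ (es : List (Int × Int)) (rab : Option (Int × Int)) (c0 : Int),
      row.foldl (pvInnerA rI) (es, rab, c0)
        = (es ++ rowEnem rI c0 row, rowRab rI c0 row rab, c0 + row.length) := by
  induction row with
  | nil => intro es rab c0; simp [rowEnem, rowRab]
  | cons cell rest ih =>
    intro es rab c0
    simp only [List.foldl_cons, pvInnerA, rowEnem, rowRab]
    by_cases h1 : PySem.Str.startswith cell "carrot" = true
    · have he : pvIsEnemyB cell = true := by unfold pvIsEnemyB; rw [h1]; rfl
      have hcw : (cell == "C") = false := by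
        rcases eq_or_ne cell "C" with h | h
        · subst h; exact absurd h1 (by decide)
        · simpa using h
      simp only [h1, if_true, hcw, ih, he, List.append_assoc, List.singleton_append,
        Prod.mk.injEq]
      refine ⟨by simp, by simp, ?_⟩
      simp only [List.length_cons]; push_cast; ring
    · by_cases h2 : PySem.Str.isIn "wolf" cell = true
      · have he : pvIsEnemyB cell = true := by
          unfold pvIsEnemyB; rw [h2]; simp
        have hcw : (cell == "C") = false := by
          rcases eq_or_ne cell "C" with h | h
          · subst h; exact absurd h2 (by decide)
          · simpa using h
        simp only [h1, h2, if_true, hcw, ih, he, List.singleton_append, Prod.mk.injEq]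
        refine ⟨by simp, by simp, ?_⟩
        simp only [List.length_cons]; push_cast; ring
      · have he : pvIsEnemyB cell = false := by
          unfold pvIsEnemyB
          rw [Bool.or_eq_false_iff]
          exact ⟨by simpa using h1, by simpa using h2⟩
        rcases eq_or_ne cell "C" with hC | hC
        · subst hC
          simp only [h1, h2, beq_self_eq_true, if_true, ih, he, Prod.mk.injEq]
          refine ⟨by simp, by simp, ?_⟩
          simp only [List.length_cons]; push_cast; ring
        · have hcw : (cell == "C") = false := by simpa using hC
          simp only [h1, h2, hcw, ih, he, Prod.mk.injEq]
          refine ⟨by simp, by simp, ?_⟩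
          simp only [List.length_cons]; push_cast; ring

lemma scanA_eq (laberinto : List (List String)) :
    ∀ (es : List (Int × Int)) (rab : Option (Int × Int)) (r0 : Int),
      laberinto.foldl
        (fun (st : List (Int × Int) × Option (Int × Int) × Int) row =>
          match st with
          | (es, rab, r) =>
            match row.foldl (pvInnerA r) (es, rab, 0) with
            | (es', rab', _) => (es', rab', r + 1))
        (es, rab, r0)
      = (es ++ gridEnem r0 laberinto, gridRab r0 laberinto rab, r0 + laberinto.length) := by
  induction laberinto with
  | nil => intro es rab r0; simp [gridEnem, gridRab]
  | cons row rest ih =>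
    intro es rab r0
    have h1 := rowA_eq r0 row es rab 0
    simp only [List.foldl_cons, h1, gridEnem, gridRab, ih, List.append_assoc, Prod.mk.injEq]
    refine ⟨trivial, trivial, ?_⟩
    simp only [List.length_cons]; push_cast; ring

lemma pvScanA_eq (laberinto : List (List String)) :
    pvScanA laberinto = (gridEnem 0 laberinto, gridRab 0 laberinto none) := by
  simp [pvScanA, scanA_eq]

-- B's rabbit fold equals the same reference rabbit
lemma rowB_eq (rI : Int) (row : List String) :
    ∀ (rab : Option (Int × Int)) (c0 : Int),
      (PySem.List.enumerate row c0).foldl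
        (fun rab2 ccell => if ccell.2 == "C" then some (rI, ccell.1) else rab2) rab
      = rowRab rI c0 row rab := by
  induction row with
  | nil => intro rab c0; simp [PySem.List.enumerate_nil, rowRab]
  | cons cell rest ih =>
    intro rab c0
    simp only [PySem.List.enumerate_cons, List.foldl_cons, rowRab]
    exact ih _ _

lemma findRabbitB_eq (laberinto : List (List String)) :
    ∀ (rab : Option (Int × Int)) (r0 : Int),
      (PySem.List.enumerate laberinto r0).foldl
        (fun rab rrow =>
          (PySem.List.enumerate rrow.2).foldl
            (fun rab2 ccell => if ccell.2 == "C" then some (rrow.1, ccell.1) else rab2) rab)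
        rab
      = gridRab r0 laberinto rab := by
  induction laberinto with
  | nil => intro rab r0; simp [PySem.List.enumerate_nil, gridRab]
  | cons row rest ih =>
    intro rab r0
    have h1 := rowB_eq r0 row rab 0
    simp only [PySem.List.enumerate_cons, List.foldl_cons, gridRab, h1]
    exact ih _ _

lemma pvFindRabbitB_eq (laberinto : List (List String)) :
    pvFindRabbitB laberinto = gridRab 0 laberinto none := by
  unfold pvFindRabbitB
  exact findRabbitB_eq laberinto none 0

-- Pre_ forces a rabbit
lemma rowRab_isSome_mono (rI c0 : Int) (row : List String) (rab : Option (Int × Int))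
    (h : rab.isSome) : (rowRab rI c0 row rab).isSome := by
  induction row generalizing rab c0 with
  | nil => exact h
  | cons cell rest ih =>
    simp only [rowRab]
    apply ih
    by_cases hc : cell == "C" <;> simp [hc, h]

lemma rowRab_isSome_of_mem (rI : Int) (row : List String) (hC : "C" ∈ row) :
    ∀ (c0 : Int) (rab : Option (Int × Int)), (rowRab rI c0 row rab).isSome := by
  induction row with
  | nil => cases hC
  | cons cell rest ih =>
    intro c0 rab
    rcases List.mem_cons.mp hC with h | h
    · simp only [rowRab]
      by_cases hrest : "C" ∈ rest
      · exact ih hrest _ _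
      · apply rowRab_isSome_mono
        simp [← h]
    · exact ih h _ _

lemma gridRab_isSome_mono (r0 : Int) (lab : List (List String)) (rab : Option (Int × Int))
    (h : rab.isSome) : (gridRab r0 lab rab).isSome := by
  induction lab generalizing rab r0 with
  | nil => exact h
  | cons row rest ih => exact ih _ _ (rowRab_isSome_mono _ _ _ _ h)

lemma gridRab_isSome_of_pre (lab : List (List String))
    (h : ∃ row ∈ lab, "C" ∈ row) :
    ∀ (r0 : Int) (rab : Option (Int × Int)), (gridRab r0 lab rab).isSome := by
  induction lab with
  | nil => rcases h with ⟨row, hmem, _⟩; cases hmem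
  | cons row rest ih =>
    intro r0 rab
    rcases h with ⟨row', hmem, hC⟩
    rcases List.mem_cons.mp hmem with h1 | h1
    · subst h1
      by_cases hrest : ∃ r ∈ rest, "C" ∈ r
      · exact ih hrest _ _
      · exact gridRab_isSome_mono (r0 + 1) rest _ (rowRab_isSome_of_mem r0 row' hC 0 rab)
    · exact ih ⟨row', h1, hC⟩ _ _

-- A's enemy loop is an 'any' over the list
lemma pvLoopA_eq_any (rp : Int × Int) (es : List (Int × Int)) :
    pvLoopA rp es
      = es.any (fun e =>
          ((e.2 == rp.2 && e.1 == rp.1 + 1) || (e.2 == rp.2 && e.1 == rp.1 - 1)) ||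
          ((e.1 == rp.1 && rp.2 == e.2 + 1) || (e.1 == rp.1 && rp.2 == e.2 - 1))) := by
  induction es with
  | nil => rfl
  | cons e rest ih =>
    simp only [pvLoopA, List.any_cons, ← ih]
    by_cases h1 : ((e.2 == rp.2 && e.1 == rp.1 + 1) || (e.2 == rp.2 && e.1 == rp.1 - 1)) = true
    · simp [h1]
    · by_cases h2 : ((e.1 == rp.1 && rp.2 == e.2 + 1) || (e.1 == rp.1 && rp.2 == e.2 - 1)) = true
      · simp [h1, h2]
      · simp [h1, h2]

-- membership in the reference enemy list
lemma mem_rowEnem (rI : Int) (row : List String) :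
    ∀ (c0 : Int) (p : Int × Int),
      p ∈ rowEnem rI c0 row ↔
        ∃ j : Nat, j < row.length ∧ pvIsEnemyB (row.getD j "") ∧ p = (rI, c0 + (j : Int)) := by
  induction row with
  | nil => intro c0 p; simp [rowEnem]
  | cons cell rest ih =>
    intro c0 p
    simp only [rowEnem, List.mem_append, ih]
    constructor
    · rintro (h | ⟨j, hj, he, hp⟩)
      · refine ⟨0, by simp, ?_, ?_⟩
        · by_cases hc : pvIsEnemyB cell <;> simp_all
        · by_cases hc : pvIsEnemyB cell <;> simp_all
      · exact ⟨j + 1, by simpa using hj, by simpa using he, by rw [hp]; push_cast; ring_nf⟩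
    · rintro ⟨j, hj, he, hp⟩
      cases j with
      | zero => left; simp at he ⊢; simp [he, hp]
      | succ j =>
        right
        refine ⟨j, by simpa using hj, by simpa using he, ?_⟩
        rw [hp]; push_cast; ring_nf

lemma mem_gridEnem (lab : List (List String)) :
    ∀ (r0 : Int) (p : Int × Int),
      p ∈ gridEnem r0 lab ↔
        ∃ i : Nat, i < lab.length ∧ ∃ j : Nat, j < (lab.getD i []).length ∧
          pvIsEnemyB ((lab.getD i []).getD j "") ∧ p = (r0 + (i : Int), (j : Int)) := by
  induction lab with
  | nil => intro r0 p; simp [gridEnem]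
  | cons row rest ih =>
    intro r0 p
    simp only [gridEnem, List.mem_append, mem_rowEnem, ih]
    constructor
    · rintro (⟨j, hj, he, hp⟩ | ⟨i, hi, j, hj, he, hp⟩)
      · exact ⟨0, by simp, j, by simpa using hj, by simpa using he, by simpa using hp⟩
      · refine ⟨i + 1, by simpa using hi, j, by simpa using hj, by simpa using he, ?_⟩
        rw [hp]; push_cast; ring_nf
    · rintro ⟨i, hi, j, hj, he, hp⟩
      cases i with
      | zero => left; exact ⟨j, by simpa using hj, by simpa using he, by simpa using hp⟩
      | succ i =>
        right
        refine ⟨i, by simpa using hi, j, by simpa using hj, by simpa using he, ?_⟩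
        rw [hp]; push_cast; ring_nf

-- B's neighbour check decides membership in the reference enemy list
lemma pvEnemyAt_iff_mem (lab : List (List String)) (r c : Int) :
    pvEnemyAt lab r c = true ↔ (r, c) ∈ gridEnem 0 lab := by
  rw [mem_gridEnem]
  unfold pvEnemyAt
  constructor
  · intro h
    split_ifs at h with h1 h2
    · refine ⟨r.toNat, by omega, c.toNat, by omega, h, ?_⟩
      simp only [Prod.mk.injEq]
      constructor <;> omega
  · rintro ⟨i, hi, j, hj, he, hp⟩
    have hr : r = (i : Int) := by simpa using congrArg Prod.fst hp
    have hc : c = (j : Int) := by simpa using congrArg Prod.snd hp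
    subst hr; subst hc
    simp only [Int.toNat_natCast]
    rw [if_pos ⟨by omega, by exact_mod_cast hi⟩, if_pos ⟨by omega, by exact_mod_cast hj⟩]
    exact he

-- adjacency condition = the four neighbours
lemma adj_iff (rp e : Int × Int) :
    ((((e.2 == rp.2 && e.1 == rp.1 + 1) || (e.2 == rp.2 && e.1 == rp.1 - 1)) ||
      ((e.1 == rp.1 && rp.2 == e.2 + 1) || (e.1 == rp.1 && rp.2 == e.2 - 1))) = true) ↔
    (e = (rp.1 + 1, rp.2) ∨ e = (rp.1 - 1, rp.2) ∨ e = (rp.1, rp.2 - 1) ∨ e = (rp.1, rp.2 + 1)) := by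
  rcases rp with ⟨r, c⟩; rcases e with ⟨i, j⟩
  simp only [Prod.mk.injEq]
  constructor
  · intro h
    simp only [Bool.or_eq_true, Bool.and_eq_true, beq_iff_eq] at h
    omega
  · intro h
    simp only [Bool.or_eq_true, Bool.and_eq_true, beq_iff_eq]
    omega

-- MAIN: the two ports agree on Pre_
lemma main_eq (laberinto : List (List String)) (direction : String)
    (hpre : Pre_validate_enemy_colision laberinto direction) :
    validate_enemy_colision laberinto direction
      = validate_enemy_colision_alt laberinto direction := by
  unfold validate_enemy_colision validate_enemy_colision_alt
  rw [pvScanA_eq, pvFindRabbitB_eq]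
  have hsome := gridRab_isSome_of_pre laberinto hpre 0 none
  rcases h : gridRab 0 laberinto none with _ | ⟨r, c⟩
  · rw [h] at hsome
  · simp only
    congr 1
    rw [pvLoopA_eq_any]
    rcases hhit : (pvEnemyAt laberinto (r - 1) c || pvEnemyAt laberinto (r + 1) c ||
        pvEnemyAt laberinto r (c - 1) || pvEnemyAt laberinto r (c + 1)) with _ | _
    · -- no neighbouring enemy ⇒ no adjacent element in the list
      simp only [Bool.or_eq_false_iff] at hhit
      rw [List.any_eq_false]
      intro e hmem hadj
      rcases (adj_iff (r, c) e).mp hadj with he | he | he | he <;>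
        (subst he; exact absurd ((pvEnemyAt_iff_mem _ _ _).mpr hmem) (by simp_all))
    · -- some neighbouring enemy ⇒ an adjacent element exists in the list
      simp only [Bool.or_eq_true] at hhit
      rw [List.any_eq_true]
      rcases hhit with ((h1 | h1) | h1) | h1
      · exact ⟨(r - 1, c), (pvEnemyAt_iff_mem _ _ _).mp h1,
          (adj_iff (r, c) _).mpr (Or.inr (Or.inl rfl))⟩
      · exact ⟨(r + 1, c), (pvEnemyAt_iff_mem _ _ _).mp h1,
          (adj_iff (r, c) _).mpr (Or.inl rfl)⟩
      · exact ⟨(r, c - 1), (pvEnemyAt_iff_mem _ _ _).mp h1,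
          (adj_iff (r, c) _).mpr (Or.inr (Or.inr (Or.inl rfl)))⟩
      · exact ⟨(r, c + 1), (pvEnemyAt_iff_mem _ _ _).mp h1,
          (adj_iff (r, c) _).mpr (Or.inr (Or.inr (Or.inr rfl)))⟩

-- ===== VERDICT (by name: the statement is the Claim_ definition above) =====
theorem validate_enemy_colision_spec : Claim_equal_validate_enemy_colision := by
  intro lab dir _ hpre
  unfold Spec_validate_enemy_colision
  exact main_eq lab dir hpre
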